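-- pv_equiv track=rewrite | github.com/ddu0422/study | algorithm/baekjoon/greedy/silver1/1105.py | solution_refactor
-- ===== SOURCE A (Python) =====
-- def solution_refactor(l, r):
--     # 오른쪽 수가 더 크다면 항상 8이 존재하지 않도록 숫자를 만들 수 있다.
--     if len(r) > len(l):
--         return 0
--
--     answer = 0
--
--     for i, j in zip(l, r):
--         # 숫자가 동일한 것 중에서
--         if i == j:
--             # 8이 나오는 경우 8만 만들 수 있다.
--             if i == '8':
--                 answer += 1
--         # 숫자가 동일하지 않으면 사이에 8이 들어가지 않는 숫자를 만들 수 있다.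
--         else:
--             break
--
--     return answer
-- ===== SOURCE B (Python) =====
-- def solution_refactor(l, r):
--     if len(r) > len(l):
--         return 0
--     # index of first mismatch (= length of common prefix of the zipped part)
--     k = next((i for i, (a, b) in enumerate(zip(l, r)) if a != b), len(r))
--     return l[:k].count('8')
-- ===== Notes on version B (the rewrite author's own statement) =====
-- stated objective: idiomatic
-- what changed: Replaces A's single scan that counts '8's and breaks on mismatch with a two-pass decomposition: first locate the common-prefix length of l and r, then count '8's in that prefix with str.count.
import Mathlib
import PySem

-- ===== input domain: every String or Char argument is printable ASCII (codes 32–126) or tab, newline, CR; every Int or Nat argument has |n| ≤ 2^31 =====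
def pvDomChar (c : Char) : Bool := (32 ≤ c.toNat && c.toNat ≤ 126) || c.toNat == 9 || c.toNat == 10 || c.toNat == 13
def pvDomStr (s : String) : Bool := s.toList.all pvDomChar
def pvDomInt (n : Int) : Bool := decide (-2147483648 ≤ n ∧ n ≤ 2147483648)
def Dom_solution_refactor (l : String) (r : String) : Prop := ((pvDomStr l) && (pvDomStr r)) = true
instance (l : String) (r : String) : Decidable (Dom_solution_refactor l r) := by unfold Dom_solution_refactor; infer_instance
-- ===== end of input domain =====

-- B replaces A's single count-and-break scan by a two-pass decomposition (find mismatch index, then count '8's in that prefix); same cost, more idiomatic.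

-- ===== PORT A =====
-- the for-loop over zip(l, r) with break: accumulator `answer`, stop at first mismatch
def pvGoA : List Char → List Char → Int → Int
  | i :: ls, j :: rs, answer =>
      if i = j then
        if i = '8' then pvGoA ls rs (answer + 1) else pvGoA ls rs answer
      else answer
  | _, _, answer => answer

def solution_refactor (l : String) (r : String) : Int :=
  if r.toList.length > l.toList.length then 0
  else pvGoA l.toList r.toList 0

-- ===== PORT B =====
-- index of the first mismatch of the zipped pair lists; if none, the zip length (= len r under the guard)
def pvMismatch : List Char → List Char → Nat
  | a :: as, b :: bs => if a ≠ b then 0 else pvMismatch as bs + 1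
  | _, _ => 0

def solution_refactor_alt (l : String) (r : String) : Int :=
  if r.toList.length > l.toList.length then 0
  else ((l.toList.take (pvMismatch l.toList r.toList)).count '8' : Int)

-- ===== PRECONDITION & SPEC =====
def Spec_solution_refactor (l : String) (r : String) (out : Int) : Prop := out = solution_refactor_alt l r
instance (l : String) (r : String) (out : Int) : Decidable (Spec_solution_refactor l r out) := by unfold Spec_solution_refactor; infer_instance

-- ===== CLAIM (what is proved, stated in full; the proofs are below) =====
def Claim_equal_solution_refactor : Prop := ∀ (l : String) (r : String), Dom_solution_refactor l r → Spec_solution_refactor l r (solution_refactor l r)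

-- ===== LEMMAS AND PROOFS =====
theorem pvGoA_eq (ls rs : List Char) (acc : Int) :
    pvGoA ls rs acc = acc + ((ls.take (pvMismatch ls rs)).count '8' : Int) := by
  induction ls generalizing rs acc with
  | nil => cases rs <;> simp [pvGoA, pvMismatch]
  | cons a as ih =>
    cases rs with
    | nil => simp [pvGoA, pvMismatch]
    | cons b bs =>
      by_cases hab : a = b
      · subst hab
        by_cases h8 : a = '8' <;> simp [pvGoA, pvMismatch, h8, ih] <;> ring
      · simp [pvGoA, pvMismatch, hab]

-- ===== VERDICT (by name: the statement is the Claim_ definition above) =====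
theorem solution_refactor_spec : Claim_equal_solution_refactor := by
  intro l r _
  unfold Spec_solution_refactor solution_refactor solution_refactor_alt
  split
  · rfl
  · simpa using pvGoA_eq l.toList r.toList 0
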